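-- pv_equiv track=rewrite | github.com/Fronkan/advent_of_code | 2024/fronkan-python/day09/solution.py | stream_indices
-- ===== SOURCE A (Python) =====
-- def stream_indices(values, start_idx, step):
--     file_idx = start_idx
--     for comp_idx, val in enumerate(values):
--         if comp_idx%2 == 0:
--             for _ in range(val):
--                 yield file_idx
--             file_idx += step
--         else:
--             for _ in range(val):
--                 yield None
-- ===== SOURCE B (Python) =====
-- def stream_indices(values, start_idx, step):
--     # Consume the layout two entries at a time: (file block, gap block) pairs.
--     # The file index of pair k is start_idx + k*step; no parity test, no accumulator.
--     for k in range(0, len(values), 2):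
--         for _ in range(values[k]):
--             yield start_idx + (k // 2) * step
--         if k + 1 < len(values):
--             for _ in range(values[k + 1]):
--                 yield None
-- ===== Notes on version B (the rewrite author's own statement) =====
-- stated objective: alternative
-- what changed: B consumes the list two entries at a time as (file,gap) pairs, computing each pair's file index directly as start_idx + pair_number*step, instead of A's one-at-a-time loop with a parity test and a mutable file_idx accumulator.
import Mathlib
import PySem

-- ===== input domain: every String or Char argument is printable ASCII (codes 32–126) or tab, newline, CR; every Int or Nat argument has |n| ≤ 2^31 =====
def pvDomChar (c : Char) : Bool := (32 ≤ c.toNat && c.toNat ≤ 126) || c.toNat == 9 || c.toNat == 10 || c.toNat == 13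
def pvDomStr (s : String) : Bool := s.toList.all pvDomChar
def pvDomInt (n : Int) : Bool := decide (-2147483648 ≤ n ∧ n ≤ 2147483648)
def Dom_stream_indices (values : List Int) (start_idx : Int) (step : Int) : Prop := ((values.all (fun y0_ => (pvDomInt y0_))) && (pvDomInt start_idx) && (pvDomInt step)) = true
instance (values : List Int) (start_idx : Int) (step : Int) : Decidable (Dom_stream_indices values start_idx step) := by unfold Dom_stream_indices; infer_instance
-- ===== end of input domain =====

-- B consumes the layout two entries at a time as (file, gap) pairs with the pair's
-- file index computed directly, instead of A's per-entry parity test and mutable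
-- accumulator (alternative decomposition, same cost).
-- Both programs are generators; ports return the list of yielded values.

-- ===== PORT A =====
-- A: one entry at a time, parity branch on comp_idx, mutable file_idx bumped by step.
def streamA_go (step : Int) : List Int → Nat → Int → List (Option Int)
  | [], _, _ => []
  | v :: vs, comp_idx, file_idx =>
    if comp_idx % 2 == 0 then
      List.replicate v.toNat (some file_idx) ++ streamA_go step vs (comp_idx + 1) (file_idx + step)
    else
      List.replicate v.toNat none ++ streamA_go step vs (comp_idx + 1) file_idx

def stream_indices (values : List Int) (start_idx : Int) (step : Int) : List (Option Int) :=
  streamA_go step values 0 start_idx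

-- ===== PORT B =====
-- B: two entries at a time; pair k yields its file block at start_idx + k*step,
-- then its gap block of Nones; no parity test, no accumulator.
def streamB_go (start_idx step : Int) : List Int → Nat → List (Option Int)
  | [], _ => []
  | [f], k => List.replicate f.toNat (some (start_idx + (k : Int) * step))
  | f :: g :: vs, k =>
    List.replicate f.toNat (some (start_idx + (k : Int) * step)) ++
      List.replicate g.toNat none ++ streamB_go start_idx step vs (k + 1)

def stream_indices_alt (values : List Int) (start_idx : Int) (step : Int) : List (Option Int) :=
  streamB_go start_idx step values 0

-- ===== PRECONDITION & SPEC =====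
def Spec_stream_indices (values : List Int) (start_idx : Int) (step : Int) (out : List (Option Int)) : Prop := out = stream_indices_alt values start_idx step
instance (values : List Int) (start_idx : Int) (step : Int) (out : List (Option Int)) : Decidable (Spec_stream_indices values start_idx step out) := by unfold Spec_stream_indices; infer_instance

-- ===== CLAIM =====
def Claim_equal_stream_indices : Prop := ∀ (values : List Int) (start_idx : Int) (step : Int), Dom_stream_indices values start_idx step → Spec_stream_indices values start_idx step (stream_indices values start_idx step)

-- ===== LEMMAS AND PROOFS =====
-- Invariant: A started at even index 2k with accumulator start_idx + k*step
-- produces exactly B's pair-k-onwards output.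
lemma go_eq (start_idx step : Int) :
    ∀ (vs : List Int) (k : Nat),
      streamA_go step vs (2 * k) (start_idx + (k : Int) * step) =
        streamB_go start_idx step vs k := by
  have main : ∀ (n : Nat) (vs : List Int), vs.length ≤ n → ∀ k,
      streamA_go step vs (2 * k) (start_idx + (k : Int) * step) =
        streamB_go start_idx step vs k := by
    intro n
    induction n with
    | zero =>
      intro vs hlen k
      have : vs = [] := List.eq_nil_of_length_eq_zero (Nat.le_zero.mp hlen)
      subst this; rfl
    | succ n ih =>
      intro vs hlen k
      match vs with
      | [] => rfl
      | [f] =>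
        have h : (2 * k) % 2 == 0 := by simp [Nat.mul_mod_right]
        simp [streamA_go, streamB_go, h]
      | f :: g :: vs' =>
        have h : (2 * k) % 2 == 0 := by simp [Nat.mul_mod_right]
        have h2 : ((2 * k + 1) % 2 == 0) = false := by
          simp [Nat.add_mul_mod_self_left]
        simp only [streamA_go, streamB_go, h, if_true, h2, Bool.false_eq_true, if_false]
        have hstep : start_idx + (k : Int) * step + step
            = start_idx + ((k + 1 : Nat) : Int) * step := by push_cast; ring
        have hlen' : vs'.length ≤ n := by simp at hlen; omega
        rw [hstep, show 2 * k + 1 + 1 = 2 * (k + 1) by ring, ih vs' hlen' (k + 1)]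
        simp
  intro vs k
  exact main vs.length vs le_rfl k

-- ===== VERDICT =====
theorem stream_indices_spec : Claim_equal_stream_indices := by
  intro values start_idx step _
  unfold Spec_stream_indices stream_indices stream_indices_alt
  simpa using go_eq start_idx step values 0
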